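-- pv_equiv track=rewrite | github.com/WilliamWan2017/ConvertToPython | Convert.py | GetLocation_Init
-- ===== SOURCE A (Python) =====
-- def GetLocation_Init(AnalysesLine,HA,Locations,Ext=[]):
--     strResult=''
--     for iLocation in Locations.keys():
--         if Locations[iLocation]['boxName']:
--             for i in range(len(AnalysesLine)):
--                 if ('&' in AnalysesLine[i]):
--                     strResult+=Locations[iLocation]['boxName']+'_FT=False'# +str(Locations[iLocation]["isInitial"]  )
--                 else:
--                     strResult+=AnalysesLine[i]
--     return strResult
-- ===== SOURCE B (Python) =====
-- def GetLocation_Init(AnalysesLine, HA, Locations, Ext=[]):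
--     # Build a template once: maximal runs of non-'&' lines merged into one
--     # constant chunk, each '&' line replaced by a None sentinel.
--     template = []
--     run = ''
--     for line in AnalysesLine:
--         if '&' in line:
--             if run:
--                 template.append(run)
--                 run = ''
--             template.append(None)
--         else:
--             run += line
--     if run:
--         template.append(run)
--     # Fill the template once per location with a truthy boxName.
--     segments = []
--     for loc in Locations.values():
--         box = loc['boxName']
--         if box:
--             sub = box + '_FT=False'
--             segments.append(''.join(sub if piece is None else piece for piece in template))
--     return ''.join(segments)
-- ===== Notes on version B (the rewrite author's own statement) =====
-- stated objective: alternative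
-- what changed: Instead of re-scanning every line (and re-testing '&') once per location, B builds a template once in a single pass over the lines, merging each maximal run of non-'&' lines into one constant chunk with a sentinel per '&' line, then fills that template once per truthy-boxName location.
import Mathlib
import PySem

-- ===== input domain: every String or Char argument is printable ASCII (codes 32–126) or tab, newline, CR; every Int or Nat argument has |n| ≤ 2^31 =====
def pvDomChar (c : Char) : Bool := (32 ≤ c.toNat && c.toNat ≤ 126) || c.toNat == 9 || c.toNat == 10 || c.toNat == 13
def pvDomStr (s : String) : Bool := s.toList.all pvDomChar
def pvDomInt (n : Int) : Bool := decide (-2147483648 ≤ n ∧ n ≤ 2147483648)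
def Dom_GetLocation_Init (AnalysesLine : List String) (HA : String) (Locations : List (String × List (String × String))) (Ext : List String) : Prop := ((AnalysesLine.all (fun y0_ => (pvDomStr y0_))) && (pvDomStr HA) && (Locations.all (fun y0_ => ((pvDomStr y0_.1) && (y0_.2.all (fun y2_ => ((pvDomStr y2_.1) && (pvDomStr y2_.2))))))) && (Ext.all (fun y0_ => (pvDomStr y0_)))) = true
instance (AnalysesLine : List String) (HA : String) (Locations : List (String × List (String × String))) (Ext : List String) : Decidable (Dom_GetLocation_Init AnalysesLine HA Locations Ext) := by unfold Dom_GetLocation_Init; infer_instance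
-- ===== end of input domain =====

-- B builds a run-merged template of the lines once and fills it per location,
-- instead of A's per-location rescan of every line (objective: alternative decomposition).

-- ===== PORT A =====
-- literal port of A: outer loop over the dict's keys, inner loop over
-- range(len(AnalysesLine)); the string accumulator is kept as a List Char.
def GetLocation_Init (AnalysesLine : List String) (HA : String) (Locations : List (String × List (String × String))) (Ext : List String) : String :=
  let locs := PySem.Dict.ofList Locations
  String.ofList (locs.keys.foldl (fun strResult iLocation =>
    let box := (PySem.Dict.ofList (locs.getD iLocation [])).getD "boxName" ""
    if box ≠ "" then
      (PySem.List.pyRange 0 (PySem.List.len AnalysesLine)).foldl (fun acc i =>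
        if PySem.Str.isIn "&" (PySem.List.pyGetD AnalysesLine i "") then
          acc ++ box.toList ++ "_FT=False".toList
        else
          acc ++ (PySem.List.pyGetD AnalysesLine i "").toList) strResult
    else strResult) [])

-- ===== PORT B =====
-- B-side helpers: the run-merged template ('none' = a '&' line sentinel) and its fill.
def pvClose (t : List (Option (List Char))) (run : List Char) : List (Option (List Char)) :=
  if run ≠ [] then t ++ [some run] else t

def pvStep (st : List (Option (List Char)) × List Char) (line : String) :
    List (Option (List Char)) × List Char :=
  if PySem.Str.isIn "&" line then (pvClose st.1 st.2 ++ [none], [])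
  else (st.1, st.2 ++ line.toList)

def pvTemplate (lines : List String) : List (Option (List Char)) :=
  let st := lines.foldl pvStep ([], [])
  pvClose st.1 st.2

def pvFill (t : List (Option (List Char))) (sub : List Char) : List Char :=
  (t.map (fun p => p.getD sub)).flatten

def GetLocation_Init_alt (AnalysesLine : List String) (HA : String) (Locations : List (String × List (String × String))) (Ext : List String) : String :=
  let template := pvTemplate AnalysesLine
  let segments := (PySem.Dict.ofList Locations).values.foldl (fun segs loc =>
    let box := (PySem.Dict.ofList loc).getD "boxName" ""
    if box ≠ "" then segs ++ [pvFill template (box.toList ++ "_FT=False".toList)]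
    else segs) []
  String.ofList segments.flatten

-- ===== PRECONDITION & SPEC =====
-- A raises KeyError unless every location's dict has the key 'boxName'; Pre_ excludes exactly those inputs.
def Pre_GetLocation_Init (AnalysesLine : List String) (HA : String) (Locations : List (String × List (String × String))) (Ext : List String) : Prop :=
  ∀ p ∈ (PySem.Dict.ofList Locations).items, (PySem.Dict.ofList p.2).contains "boxName" = true
instance (AnalysesLine : List String) (HA : String) (Locations : List (String × List (String × String))) (Ext : List String) : Decidable (Pre_GetLocation_Init AnalysesLine HA Locations Ext) := by unfold Pre_GetLocation_Init; infer_instance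
def pvWitness_GetLocation_Init : List String × String × (List (String × List (String × String))) × List String :=
  (["x=1\n", "a&b\n", "y=2\n"], "h", [("L1", [("boxName", "B1")]), ("L2", [("boxName", "")])], [])

def Spec_GetLocation_Init (AnalysesLine : List String) (HA : String) (Locations : List (String × List (String × String))) (Ext : List String) (out : String) : Prop := out = GetLocation_Init_alt AnalysesLine HA Locations Ext
instance (AnalysesLine : List String) (HA : String) (Locations : List (String × List (String × String))) (Ext : List String) (out : String) : Decidable (Spec_GetLocation_Init AnalysesLine HA Locations Ext out) := by unfold Spec_GetLocation_Init; infer_instance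

-- ===== CLAIM (what is proved, stated in full; the proofs are below) =====
def Claim_equal_GetLocation_Init : Prop := ∀ (AnalysesLine : List String) (HA : String) (Locations : List (String × List (String × String))) (Ext : List String), Dom_GetLocation_Init AnalysesLine HA Locations Ext → Pre_GetLocation_Init AnalysesLine HA Locations Ext → Spec_GetLocation_Init AnalysesLine HA Locations Ext (GetLocation_Init AnalysesLine HA Locations Ext)

-- ===== LEMMAS AND PROOFS =====

-- the per-line substitution a location with body sub performs
def pvSub (sub : List Char) (line : String) : List Char :=
  if PySem.Str.isIn "&" line then sub else line.toList

theorem pvFill_append (t : List (Option (List Char))) (x : Option (List Char)) (sub : List Char) :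
    pvFill (t ++ [x]) sub = pvFill t sub ++ x.getD sub := by
  simp [pvFill]

theorem pvFill_close (t : List (Option (List Char))) (r sub : List Char) :
    pvFill (pvClose t r) sub = pvFill t sub ++ r := by
  unfold pvClose
  split
  · simp [pvFill_append]
  · simp_all [pvFill]

theorem pvTemplate_invariant (lines : List String) (t : List (Option (List Char))) (r sub : List Char) :
    pvFill (pvClose (lines.foldl pvStep (t, r)).1 (lines.foldl pvStep (t, r)).2) sub
      = pvFill t sub ++ r ++ lines.flatMap (pvSub sub) := by
  induction lines generalizing t r with
  | nil => simp [pvFill_close]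
  | cons line rest ih =>
    simp only [List.foldl_cons, List.flatMap_cons]
    by_cases h : PySem.Str.isIn "&" line
    · rw [show pvStep (t, r) line = (pvClose t r ++ [none], []) from by unfold pvStep; rw [if_pos h]]
      rw [ih, show pvSub sub line = sub from by unfold pvSub; rw [if_pos h]]
      simp [pvFill_close, pvFill_append, List.append_assoc]
    · rw [show pvStep (t, r) line = (t, r ++ line.toList) from by unfold pvStep; rw [if_neg h]]
      rw [ih, show pvSub sub line = line.toList from by unfold pvSub; rw [if_neg h]]
      simp [List.append_assoc]

theorem pvFill_template (lines : List String) (sub : List Char) :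
    pvFill (pvTemplate lines) sub = lines.flatMap (pvSub sub) := by
  unfold pvTemplate
  have := pvTemplate_invariant lines [] [] sub
  simpa [pvFill] using this

-- A's inner range-loop, started at acc, appends the flatMap of the substitution
theorem pvInner_eq (lines : List String) (box : String) (acc : List Char) :
    (PySem.List.pyRange 0 (PySem.List.len lines)).foldl (fun acc i =>
        if PySem.Str.isIn "&" (PySem.List.pyGetD lines i "") then
          acc ++ box.toList ++ "_FT=False".toList
        else
          acc ++ (PySem.List.pyGetD lines i "").toList) acc
      = acc ++ lines.flatMap (pvSub (box.toList ++ "_FT=False".toList)) := by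
  have h := PySem.List.foldl_pyRange_pyGetD lines "" (fun acc line =>
      if PySem.Str.isIn "&" line then acc ++ box.toList ++ "_FT=False".toList
      else acc ++ line.toList) acc (a := 0) (by norm_num)
  simp only [Int.toNat_zero, List.drop_zero] at h
  rw [h]
  have : (fun (acc : List Char) (line : String) =>
      if PySem.Str.isIn "&" line then acc ++ box.toList ++ "_FT=False".toList
      else acc ++ line.toList)
      = fun acc line => acc ++ pvSub (box.toList ++ "_FT=False".toList) line := by
    funext acc line
    unfold pvSub
    split <;> simp
  rw [this, PySem.List.foldl_append_eq_flatMap]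

-- the two outer loops produce the same characters
theorem pvOuter_eq {κ : Type} (ks : List κ) (c : κ → Prop) [DecidablePred c] (v : κ → List Char)
    (s1 : List Char) (s2 : List (List Char)) (h : s1 = s2.flatten) :
    ks.foldl (fun acc k => if c k then acc ++ v k else acc) s1
      = (ks.foldl (fun segs k => if c k then segs ++ [v k] else segs) s2).flatten := by
  induction ks generalizing s1 s2 with
  | nil => simpa using h
  | cons k rest ih =>
    simp only [List.foldl_cons]
    by_cases hk : c k
    · rw [if_pos hk, if_pos hk]
      exact ih _ _ (by simp [h])
    · rw [if_neg hk, if_neg hk]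
      exact ih _ _ h

-- ===== VERDICT (by name: the statement is the Claim_ definition above) =====
theorem GetLocation_Init_spec : Claim_equal_GetLocation_Init := by
  intro AnalysesLine HA Locations Ext _ _
  unfold Spec_GetLocation_Init GetLocation_Init GetLocation_Init_alt
  simp only []
  congr 1
  rw [PySem.Dict.values_eq_map_keys (PySem.Dict.ofList Locations)
        (PySem.Dict.nodup_keys_ofList Locations) [], List.foldl_map]
  rw [PySem.List.foldl_congr_mem (PySem.Dict.ofList Locations).keys _
      (fun acc k =>
        if ((PySem.Dict.ofList ((PySem.Dict.ofList Locations).getD k [])).getD "boxName" "") ≠ "" then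
          acc ++ pvFill (pvTemplate AnalysesLine)
            (((PySem.Dict.ofList ((PySem.Dict.ofList Locations).getD k [])).getD "boxName" "").toList ++ "_FT=False".toList)
        else acc) []
      (fun acc k _ => by
        dsimp only
        split_ifs with hb
        · rw [pvInner_eq, pvFill_template]
        · rfl)]
  exact pvOuter_eq _ _ _ [] [] rfl
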